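-- pv_equiv track=rewrite | github.com/napassporn/drowning-dashboard | drowning_case.py | sort_zones_numerically
-- ===== SOURCE A (Python) =====
-- def sort_zones_numerically(zones):
--     def extract_number(zone_str):
--         try:
--             return int(str(zone_str).strip())
--         except (ValueError, TypeError):
--             return float('inf')
--     valid_zones = [z for z in zones if str(z) != 'nan' and str(z).strip() != '']
--     return sorted(valid_zones, key=extract_number)
-- ===== SOURCE B (Python) =====
-- def sort_zones_numerically(zones):
--     numeric = []
--     non_numeric = []
--     for z in zones:
--         s = str(z)
--         if s == 'nan' or s.strip() == '':
--             continue
--         try: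
--             numeric.append((int(s.strip()), z))
--         except (ValueError, TypeError):
--             non_numeric.append(z)
--     numeric.sort(key=lambda p: p[0])
--     return [z for _, z in numeric] + non_numeric
-- ===== Notes on version B (the rewrite author's own statement) =====
-- stated objective: alternative
-- what changed: Replaces the single sentinel-keyed (float('inf')) sort with an explicit one-pass partition into parsed-numeric pairs and non-numerics, a stable sort of the numeric pairs by their parsed value, and concatenation with the non-numerics in original order.
import Mathlib
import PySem

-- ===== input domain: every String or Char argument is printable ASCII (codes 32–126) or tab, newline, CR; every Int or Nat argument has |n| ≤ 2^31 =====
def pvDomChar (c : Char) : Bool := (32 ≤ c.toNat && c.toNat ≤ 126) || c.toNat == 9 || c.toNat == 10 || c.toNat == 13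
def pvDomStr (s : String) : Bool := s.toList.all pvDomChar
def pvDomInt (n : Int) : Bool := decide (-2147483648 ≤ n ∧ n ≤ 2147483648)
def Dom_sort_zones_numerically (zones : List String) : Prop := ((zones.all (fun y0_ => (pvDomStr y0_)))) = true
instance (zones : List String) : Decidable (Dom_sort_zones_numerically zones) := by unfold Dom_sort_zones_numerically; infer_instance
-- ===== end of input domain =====

-- B replaces A's sentinel-keyed (float('inf')) sort by a one-pass partition into numeric pairs
-- and non-numerics, a stable sort of the pairs by parsed value, and concatenation (objective:
-- alternative decomposition, same cost).

-- ===== PORT A =====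
-- int(str(z).strip()); on a string argument str(z) is z itself.
def pvExtract (z : String) : Option Int := PySem.Int.ofStr? (PySem.Str.strip z)

-- A sorts with key = parsed int for numeric zones and float('inf') for the rest. On this
-- domain (ints and the single value inf, which is greater than every int and equal only to
-- itself) that key order is exactly the lexicographic tuple key ((0, v) for numeric, (1, 0)
-- for non-numeric), which is what sorted2 computes; the sort is stable in both views.
def sort_zones_numerically (zones : List String) : List String :=
  let valid_zones := zones.filter (fun z => z != "nan" && PySem.Str.strip z != "")
  PySem.List.sorted2 valid_zones
    (fun z => if (pvExtract z).isSome then (0 : Int) else 1)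
    (fun z => (pvExtract z).getD 0) false

-- ===== PORT B =====
-- one pass: skip 'nan'/blank, classify by int(s.strip()) into (value, zone) pairs / non-numerics
def pvPartition (zones : List String) : List (Int × String) × List String :=
  zones.foldl
    (fun acc z =>
      if z == "nan" || PySem.Str.strip z == "" then acc
      else
        match PySem.Int.ofStr? (PySem.Str.strip z) with
        | some v => (acc.1 ++ [(v, z)], acc.2)
        | none => (acc.1, acc.2 ++ [z]))
    ([], [])

def sort_zones_numerically_alt (zones : List String) : List String :=
  let p := pvPartition zones
  (PySem.List.sorted p.1 (fun q => q.1) false).map (fun q => q.2) ++ p.2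

-- ===== PRECONDITION & SPEC =====
def Spec_sort_zones_numerically (zones : List String) (out : List String) : Prop := out = sort_zones_numerically_alt zones
instance (zones : List String) (out : List String) : Decidable (Spec_sort_zones_numerically zones out) := by unfold Spec_sort_zones_numerically; infer_instance

-- ===== CLAIM (what is proved, stated in full; the proofs are below) =====
def Claim_equal_sort_zones_numerically : Prop := ∀ (zones : List String), Dom_sort_zones_numerically zones → Spec_sort_zones_numerically zones (sort_zones_numerically zones)

-- ===== LEMMAS AND PROOFS =====

-- A's comparison function (the 'before' of sorted2's insertion sort), named for the lemmas
def pvLt2 (a b : String) : Bool :=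
  decide ((if (pvExtract a).isSome then (0 : Int) else 1) < (if (pvExtract b).isSome then (0 : Int) else 1)) ||
    (!decide ((if (pvExtract b).isSome then (0 : Int) else 1) < (if (pvExtract a).isSome then (0 : Int) else 1)) &&
      decide ((pvExtract a).getD 0 < (pvExtract b).getD 0))

lemma pvLt2_num_num {a b : String} {va vb : Int} (ha : pvExtract a = some va)
    (hb : pvExtract b = some vb) : pvLt2 a b = decide (va < vb) := by
  simp [pvLt2, ha, hb]

lemma pvLt2_num_non {a b : String} {va : Int} (ha : pvExtract a = some va)
    (hb : pvExtract b = none) : pvLt2 a b = true := by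
  simp [pvLt2, ha, hb]

lemma pvLt2_non {a b : String} (ha : pvExtract a = none) : pvLt2 a b = false := by
  cases hb : pvExtract b <;> simp [pvLt2, ha, hb]

-- inserting below a tail every element of which compares after x
lemma insertBy_append_of_before {α : Type} (before : α → α → Bool) (x : α) (S N : List α)
    (hN : ∀ y ∈ N, before x y = true) :
    PySem.List.insertBy before x (S ++ N) = PySem.List.insertBy before x S ++ N := by
  induction S with
  | nil =>
      cases N with
      | nil => rfl
      | cons n N' => simp [PySem.List.insertBy, hN n (by simp)]
  | cons s S' ih =>
      by_cases h : before x s = true <;> simp [PySem.List.insertBy, h, ih]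

-- inserting a numeric zone into the mapped pair list = mapping the pair insertion
lemma insertBy_map_snd {z : String} {v : Int} (hz : pvExtract z = some v) :
    ∀ (P : List (Int × String)), (∀ p ∈ P, pvExtract p.2 = some p.1) →
    PySem.List.insertBy pvLt2 z (P.map (fun q => q.2)) =
      (PySem.List.insertBy (fun a b => decide (a.1 < b.1)) (v, z) P).map (fun q => q.2) := by
  intro P
  induction P with
  | nil => intro _; rfl
  | cons p P' ih =>
      intro hP
      have hp : pvExtract p.2 = some p.1 := hP p (by simp)
      have hcmp : pvLt2 z p.2 = decide (v < p.1) := pvLt2_num_num hz hp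
      by_cases h : v < p.1
      · simp [PySem.List.insertBy, hcmp, h]
      · simp [PySem.List.insertBy, hcmp, h, ih (fun q hq => hP q (by simp [hq]))]

-- the A-side insertion fold, run from any partitioned accumulator, stays partitioned
lemma fold_insert_partition :
    ∀ (xs : List String) (P : List (Int × String)) (N : List String),
      (∀ p ∈ P, pvExtract p.2 = some p.1) → (∀ z ∈ N, pvExtract z = none) →
      xs.foldl (fun acc x => PySem.List.insertBy pvLt2 x acc) (P.map (fun q => q.2) ++ N) =
        (xs.foldl
            (fun acc z =>
              match pvExtract z with
              | some v => PySem.List.insertBy (fun a b => decide (a.1 < b.1)) (v, z) acc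
              | none => acc) P).map (fun q => q.2) ++
          xs.foldl (fun acc z => if (pvExtract z).isNone then acc ++ [z] else acc) N := by
  intro xs
  induction xs with
  | nil => intro P N _ _; rfl
  | cons x xs' ih =>
      intro P N hP hN
      cases hx : pvExtract x with
      | some v =>
          have h1 : PySem.List.insertBy pvLt2 x (P.map (fun q => q.2) ++ N) =
              PySem.List.insertBy pvLt2 x (P.map (fun q => q.2)) ++ N :=
            insertBy_append_of_before _ _ _ _ (fun y hy => pvLt2_num_non hx (hN y hy))
          have h2 := insertBy_map_snd hx P hP
          have hP' : ∀ p ∈ PySem.List.insertBy (fun a b => decide (a.1 < b.1)) (v, x) P,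
              pvExtract p.2 = some p.1 := by
            intro p hp
            rcases (PySem.List.mem_insertBy _ _ _ _).1 hp with h | h
            · simpa [h] using hx
            · exact hP p h
          simp only [List.foldl_cons, hx, h1, h2, Option.isNone_some, Bool.false_eq_true,
            if_false]
          exact ih _ N hP' hN
      | none =>
          have h1 : PySem.List.insertBy pvLt2 x (P.map (fun q => q.2) ++ N) =
              (P.map (fun q => q.2) ++ N) ++ [x] :=
            PySem.List.insertBy_of_forall_not_before _ _ _ (fun y _ => pvLt2_non hx)
          have hN' : ∀ z ∈ N ++ [x], pvExtract z = none := by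
            intro z hz
            rcases List.mem_append.1 hz with h | h
            · exact hN z h
            · simp at h; simpa [h] using hx
          simp only [List.foldl_cons, hx, h1, Option.isNone_none, if_true, List.append_assoc]
          exact ih P (N ++ [x]) hP hN'

-- folding the pair-insertions over xs = folding over the filterMapped pair list
lemma foldl_match_eq_foldl_filterMap {β : Type}
    (g : List β → (Int × String) → List β) :
    ∀ (xs : List String) (acc : List β),
      xs.foldl
          (fun acc z =>
            match pvExtract z with
            | some v => g acc (v, z)
            | none => acc) acc =
        (xs.filterMap (fun z => (pvExtract z).map (fun v => (v, z)))).foldl g acc := by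
  intro xs
  induction xs with
  | nil => intro acc; rfl
  | cons x xs' ih =>
      intro acc
      cases hx : pvExtract x <;> simp [hx, ih]

-- B's one-pass partition, characterised over the filtered list
lemma pvPartition_eq (zones : List String) :
    pvPartition zones =
      ((zones.filter (fun z => z != "nan" && PySem.Str.strip z != "")).filterMap
          (fun z => (pvExtract z).map (fun v => (v, z))),
        (zones.filter (fun z => z != "nan" && PySem.Str.strip z != "")).filter
          (fun z => (pvExtract z).isNone)) := by
  suffices h : ∀ (zs : List String) (P : List (Int × String)) (N : List String),
      zs.foldl
          (fun acc z =>
            if z == "nan" || PySem.Str.strip z == "" then acc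
            else
              match PySem.Int.ofStr? (PySem.Str.strip z) with
              | some v => (acc.1 ++ [(v, z)], acc.2)
              | none => (acc.1, acc.2 ++ [z]))
          (P, N) =
        (P ++ (zs.filter (fun z => z != "nan" && PySem.Str.strip z != "")).filterMap
            (fun z => (pvExtract z).map (fun v => (v, z))),
          N ++ (zs.filter (fun z => z != "nan" && PySem.Str.strip z != "")).filter
            (fun z => (pvExtract z).isNone)) by
    unfold pvPartition
    rw [h zones [] []]
    simp
  intro zs
  induction zs with
  | nil => intro P N; simp
  | cons z zs' ih =>
      intro P N
      rw [List.foldl_cons]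
      by_cases hc : (z == "nan" || PySem.Str.strip z == "") = true
      · rw [if_pos hc]
        have hp : (z != "nan" && PySem.Str.strip z != "") = false := by
          simp only [Bool.or_eq_true, beq_iff_eq] at hc
          simp only [Bool.and_eq_false_iff, bne_eq_false_iff_eq]
          tauto
        rw [List.filter_cons_of_neg (by simp [hp]), ih]
      · rw [if_neg hc]
        have hp : (z != "nan" && PySem.Str.strip z != "") = true := by
          simp only [Bool.or_eq_true, beq_iff_eq] at hc
          push Not at hc
          simp only [Bool.and_eq_true, bne_iff_ne]
          tauto
        rw [List.filter_cons_of_pos (by simp [hp])]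
        cases hx : PySem.Int.ofStr? (PySem.Str.strip z) with
        | some v =>
            simp only [ih]
            simp [pvExtract, hx]
        | none =>
            simp only [ih]
            simp [pvExtract, hx]
-- ===== VERDICT (by name: the statement is the Claim_ definition above) =====
theorem sort_zones_numerically_spec : Claim_equal_sort_zones_numerically := by
  intro zones _
  unfold Spec_sort_zones_numerically
  have hB : sort_zones_numerically_alt zones =
      (PySem.List.sorted
          ((zones.filter (fun z => z != "nan" && PySem.Str.strip z != "")).filterMap
            (fun z => (pvExtract z).map (fun v => (v, z)))) (fun q => q.1) false).map
          (fun q => q.2) ++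
        (zones.filter (fun z => z != "nan" && PySem.Str.strip z != "")).filter
          (fun z => (pvExtract z).isNone) := by
    unfold sort_zones_numerically_alt
    rw [pvPartition_eq]
  rw [hB]
  unfold sort_zones_numerically
  set valid := zones.filter (fun z => z != "nan" && PySem.Str.strip z != "") with hvalid
  have hA : PySem.List.sorted2 valid
      (fun z => if (pvExtract z).isSome then (0 : Int) else 1)
      (fun z => (pvExtract z).getD 0) false =
      valid.foldl (fun acc x => PySem.List.insertBy pvLt2 x acc) [] := rfl
  have hmain := fold_insert_partition valid [] [] (by simp) (by simp)
  simp only [List.map_nil, List.nil_append] at hmain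
  rw [hA, hmain, PySem.List.sorted_eq_foldl_insertBy,
    foldl_match_eq_foldl_filterMap
      (fun acc p => PySem.List.insertBy (fun a b => decide (a.1 < b.1)) p acc) valid [],
    PySem.List.foldl_append_if_eq_filter]
  simp
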